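-- pv_equiv track=rewrite | github.com/Clark1216/CE2M_Journey-TheWorldAvatar | QuestionAnswering/QA_SEQ2SEQ/data_generation/paraphrase/base.py | _extract_literals_by_tag
-- ===== SOURCE A (Python) =====
-- from typing import List, Optional, Tuple
--
-- def _extract_literals_by_tag(text: str):
--     """Extracts literals enclosed by <span> tags."""
--     literals: List[str] = []
--     ptr = 0
--     while ptr < len(text):
--         start = text.find("<span>", ptr)
--         if start < 0:
--             break
--
--         end = text.find("</span>", start)
--         if end < 0:
--             break
--
--         ptr = end + len("</span>")
--         literals.append(text[start:ptr])
--     return literals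
-- ===== SOURCE B (Python) =====
-- import re
--
-- _SPAN_RE = re.compile(r"<span>.*?</span>", re.DOTALL)
--
-- def _extract_literals_by_tag(text: str):
--     """Extracts literals enclosed by <span> tags."""
--     return _SPAN_RE.findall(text)
-- ===== Notes on version B (the rewrite author's own statement) =====
-- stated objective: idiomatic
-- what changed: Replaces the manual ptr/str.find while-loop with a single precompiled non-greedy regex findall (re.DOTALL), whose lazy matcher scans positions and extends each match to the nearest close tag.
import Mathlib
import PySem

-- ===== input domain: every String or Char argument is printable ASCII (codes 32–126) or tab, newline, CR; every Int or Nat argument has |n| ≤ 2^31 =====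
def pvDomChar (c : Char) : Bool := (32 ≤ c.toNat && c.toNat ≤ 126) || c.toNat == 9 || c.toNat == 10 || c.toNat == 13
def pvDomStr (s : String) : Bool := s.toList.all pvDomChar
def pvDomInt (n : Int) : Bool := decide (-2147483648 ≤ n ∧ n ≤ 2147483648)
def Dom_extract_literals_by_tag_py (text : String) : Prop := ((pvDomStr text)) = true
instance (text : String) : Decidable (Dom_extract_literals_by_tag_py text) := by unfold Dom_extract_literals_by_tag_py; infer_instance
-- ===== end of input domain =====

-- B replaces A's manual ptr/str.find while-loop by a non-greedy regex findall (re.DOTALL);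
-- the Lean port of B transliterates the lazy regex matcher (position scan, shortest extension).

-- the two tag literals ("<span>" and "</span>" as lists of code points)
def pvOpen : List Char := ['<', 's', 'p', 'a', 'n', '>']
def pvClose : List Char := ['<', '/', 's', 'p', 'a', 'n', '>']

-- ===== PORT A =====
theorem prefix_open_len {s : List Char} {m : Nat} (h : pvOpen <+: s.drop m) :
    m + 6 ≤ s.length := by
  have := h.length_le; simp [pvOpen] at this; omega

-- lemma needed only for goA's termination (cited in decreasing_by)
theorem goA_step (s : List Char) (ptr : Nat) (h : ptr < s.length)
    (hs : ¬ PySem.Chars.findFrom s pvOpen ↑ptr < 0)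
    (he : ¬ PySem.Chars.findFrom s pvClose (PySem.Chars.findFrom s pvOpen ↑ptr) < 0) :
    ptr < (PySem.Chars.findFrom s pvClose (PySem.Chars.findFrom s pvOpen ↑ptr)).toNat + 7 := by
  have hf : PySem.Chars.findFrom s pvOpen ↑ptr ≠ -1 := by intro hc; rw [hc] at hs; omega
  obtain ⟨h1, h2, -⟩ := PySem.Chars.findFrom_natCast_spec s pvOpen ptr (le_of_lt h) hf
  have hlen := prefix_open_len h2
  have hcast : PySem.Chars.findFrom s pvOpen ↑ptr
      = ((PySem.Chars.findFrom s pvOpen ↑ptr).toNat : Int) := by omega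
  rw [hcast] at he
  have he' : PySem.Chars.findFrom s pvClose ↑(PySem.Chars.findFrom s pvOpen ↑ptr).toNat ≠ -1 := by
    intro hc; rw [hc] at he; omega
  obtain ⟨h3, -, -⟩ := PySem.Chars.findFrom_natCast_spec s pvClose
    (PySem.Chars.findFrom s pvOpen ↑ptr).toNat (by omega) he'
  rw [← hcast] at h3
  omega

-- while ptr < len(text): start = text.find("<span>", ptr); …; end = text.find("</span>", start);
-- ptr = end + 7; literals.append(text[start:ptr])
def goA (s : List Char) (ptr : Nat) (acc : List String) : List String :=
  if h : ptr < s.length then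
    if hs : PySem.Chars.findFrom s pvOpen ↑ptr < 0 then acc
    else if he : PySem.Chars.findFrom s pvClose (PySem.Chars.findFrom s pvOpen ↑ptr) < 0 then acc
    else
      goA s ((PySem.Chars.findFrom s pvClose (PySem.Chars.findFrom s pvOpen ↑ptr)).toNat + 7)
        (acc ++ [String.ofList (PySem.List.slice s (some (PySem.Chars.findFrom s pvOpen ↑ptr))
          (some (PySem.Chars.findFrom s pvClose (PySem.Chars.findFrom s pvOpen ↑ptr) + 7)))])
  else acc
termination_by s.length - ptr
decreasing_by have := goA_step s ptr h hs he; omega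

def extract_literals_by_tag_py (text : String) : List String :=
  goA text.toList 0 []

-- ===== PORT B =====
-- the lazy part '.*?</span>': shortest extension — first j ≥ start where "</span>" matches
def scanClose (s : List Char) (j : Nat) : Option Nat :=
  if h : j < s.length then
    if pvClose.isPrefixOf (s.drop j) then some j
    else scanClose s (j + 1)
  else none
termination_by s.length - j
decreasing_by omega

-- lemma needed only for goB's termination (cited in decreasing_by)
theorem scanClose_ge (s : List Char) (j m : Nat) (h : scanClose s j = some m) : j ≤ m := by
  fun_induction scanClose s j with
  | case1 j hj hpre => simp at h; omega
  | case2 j hj hpre ih => have := ih h; omega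
  | case3 j hj => simp at h

-- re.findall(r"<span>.*?</span>", text, re.DOTALL): scan positions left to right; at a
-- position matching "<span>", extend lazily to the nearest "</span>" (match = text[i:j+7],
-- resume after it); if the literal "<span>" fails or no close follows, advance one position
def goB (s : List Char) (i : Nat) (acc : List String) : List String :=
  if h : i < s.length then
    if pvOpen.isPrefixOf (s.drop i) then
      match hm : scanClose s (i + 6) with
      | some j => goB s (j + 7) (acc ++ [String.ofList ((s.drop i).take (j + 7 - i))])
      | none => goB s (i + 1) acc
    else goB s (i + 1) acc
  else acc
termination_by s.length - i
decreasing_by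
  · have := scanClose_ge s (i + 6) j hm; omega
  · omega
  · omega

def extract_literals_by_tag_py_alt (text : String) : List String :=
  goB text.toList 0 []

-- ===== PRECONDITION & SPEC =====
def Spec_extract_literals_by_tag_py (text : String) (out : List String) : Prop := out = extract_literals_by_tag_py_alt text
instance (text : String) (out : List String) : Decidable (Spec_extract_literals_by_tag_py text out) := by unfold Spec_extract_literals_by_tag_py; infer_instance

-- ===== CLAIM (what is proved, stated in full; the proofs are below) =====
def Claim_equal_extract_literals_by_tag_py : Prop := ∀ (text : String), Dom_extract_literals_by_tag_py text → Spec_extract_literals_by_tag_py text (extract_literals_by_tag_py text)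

-- ===== LEMMAS AND PROOFS =====

theorem prefix_close_len {s : List Char} {m : Nat} (h : pvClose <+: s.drop m) :
    m + 7 ≤ s.length := by
  have := h.length_le; simp [pvClose] at this; omega

-- a prefix of a later drop is an infix of an earlier drop
theorem prefix_drop_infix {s sub : List Char} {a i : Nat} (ha : a ≤ i)
    (h : sub <+: s.drop i) : sub <:+: s.drop a := by
  have hd : s.drop i = (s.drop a).drop (i - a) := by
    rw [List.drop_drop]; congr 1; omega
  rw [hd] at h
  exact h.isInfix.trans (List.drop_suffix _ _).isInfix

-- "</span>" cannot start inside the six characters of a matched "<span>"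
theorem no_close_near {s : List Char} {m : Nat} (h : pvOpen <+: s.drop m)
    {d : Nat} (hd : d < 6) : ¬ pvClose <+: s.drop (m + d) := by
  obtain ⟨t, ht⟩ := h
  have hdd : s.drop (m + d) = (pvOpen ++ t).drop d := by
    rw [ht, List.drop_drop, Nat.add_comm]
  intro hc
  rw [hdd] at hc
  interval_cases d <;> simp [pvOpen, pvClose, List.cons_prefix_cons] at hc

theorem scanClose_eq_none (s : List Char) :
    ∀ n j, s.length - j ≤ n → (∀ i, j ≤ i → ¬ pvClose <+: s.drop i) →
      scanClose s j = none := by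
  intro n
  induction n with
  | zero =>
    intro j h1 _
    rw [scanClose, dif_neg (by omega)]
  | succ n ih =>
    intro j h1 h2
    by_cases hj : j < s.length
    · rw [scanClose, dif_pos hj, if_neg]
      · exact ih (j + 1) (by omega) (fun i hi => h2 i (by omega))
      · rw [List.isPrefixOf_iff_prefix]; exact h2 j le_rfl
    · rw [scanClose, dif_neg hj]

theorem scanClose_eq_some_of (s : List Char) :
    ∀ n j x, x - j ≤ n → j ≤ x → pvClose <+: s.drop x →
      (∀ i, j ≤ i → i < x → ¬ pvClose <+: s.drop i) →
      scanClose s j = some x := by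
  intro n
  induction n with
  | zero =>
    intro j x h1 h2 h3 _
    have hjx : j = x := by omega
    subst hjx
    rw [scanClose, dif_pos (by have := prefix_close_len h3; omega),
      if_pos (by rw [List.isPrefixOf_iff_prefix]; exact h3)]
  | succ n ih =>
    intro j x h1 h2 h3 h4
    by_cases hjx : j = x
    · subst hjx
      rw [scanClose, dif_pos (by have := prefix_close_len h3; omega),
        if_pos (by rw [List.isPrefixOf_iff_prefix]; exact h3)]
    · have hlt : j < x := by omega
      rw [scanClose, dif_pos (by have := prefix_close_len h3; omega),
        if_neg (by rw [List.isPrefixOf_iff_prefix]; exact h4 j le_rfl hlt)]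
      exact ih (j + 1) x (by omega) (by omega) h3 (fun i hi => h4 i (by omega))

-- B's scan skips positions where "<span>" does not match
theorem goB_skip (s : List Char) (acc : List String) :
    ∀ n a b, b - a ≤ n → a ≤ b → (∀ i, a ≤ i → i < b → ¬ pvOpen <+: s.drop i) →
      goB s a acc = goB s b acc := by
  intro n
  induction n with
  | zero =>
    intro a b h1 h2 _
    have hab : a = b := by omega
    subst hab
    rfl
  | succ n ih =>
    intro a b h1 h2 h3
    by_cases hab : a = b
    · rw [hab]
    · have hlt : a < b := by omega
      have hstep : goB s a acc = goB s (a + 1) acc := by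
        by_cases hlen : a < s.length
        · rw [goB, dif_pos hlen, if_neg]
          rw [List.isPrefixOf_iff_prefix]; exact h3 a le_rfl hlt
        · rw [goB, dif_neg hlen]
          rw [goB, dif_neg (by omega)]
      rw [hstep]
      exact ih (a + 1) b (by omega) (by omega) (fun i hi hib => h3 i (by omega) hib)

-- when no "</span>" occurs at or after m, and every "<span>" position is ≥ m, B returns acc
theorem goB_none (s : List Char) (acc : List String) :
    ∀ n a m, s.length - a ≤ n →
      (∀ j, m ≤ j → ¬ pvClose <+: s.drop j) →
      (∀ i, a ≤ i → pvOpen <+: s.drop i → m ≤ i) →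
      goB s a acc = acc := by
  intro n
  induction n with
  | zero => intro a m h1 _ _; rw [goB, dif_neg (by omega)]
  | succ n ih =>
    intro a m h1 h2 h3
    by_cases hlen : a < s.length
    · rw [goB, dif_pos hlen]
      by_cases hopen : pvOpen <+: s.drop a
      · rw [if_pos (by rw [List.isPrefixOf_iff_prefix]; exact hopen)]
        have hma : m ≤ a := h3 a le_rfl hopen
        have hnone : scanClose s (a + 6) = none :=
          scanClose_eq_none s s.length (a + 6) (by omega) (fun i hi => h2 i (by omega))
        split
        · next j heq => rw [hnone] at heq; exact absurd heq (by simp)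
        · exact ih (a + 1) m (by omega) h2 (fun i hi => h3 i (by omega))
      · rw [if_neg (by rw [List.isPrefixOf_iff_prefix]; exact hopen)]
        exact ih (a + 1) m (by omega) h2 (fun i hi => h3 i (by omega))
    · rw [goB, dif_neg hlen]

-- main equivalence: A's find-loop and B's regex scan produce the same list
theorem goA_eq_goB (s : List Char) :
    ∀ n ptr acc, s.length - ptr ≤ n → goA s ptr acc = goB s ptr acc := by
  intro n
  induction n with
  | zero =>
    intro ptr acc h
    rw [goA, dif_neg (by omega), goB, dif_neg (by omega)]
  | succ n ih =>
    intro ptr acc hn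
    by_cases hlen : ptr < s.length
    · by_cases hf : PySem.Chars.findFrom s pvOpen ↑ptr = -1
      · -- no "<span>" at or after ptr: both return acc
        have hno := (PySem.Chars.findFrom_natCast_eq_neg_one_iff s pvOpen ptr
          (le_of_lt hlen)).mp hf
        have hnoP : ∀ i, ptr ≤ i → ¬ pvOpen <+: s.drop i := by
          intro i hi hpre; exact hno (prefix_drop_infix hi hpre)
        have hA : goA s ptr acc = acc := by
          rw [goA, dif_pos hlen, dif_pos (by rw [hf]; omega)]
        have hB : goB s ptr acc = acc := by
          rw [goB_skip s acc s.length ptr s.length (by omega) (by omega)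
            (fun i h1 _ => hnoP i h1)]
          rw [goB, dif_neg (by omega)]
        rw [hA, hB]
      · obtain ⟨hge, hOpen, hmin⟩ :=
          PySem.Chars.findFrom_natCast_spec s pvOpen ptr (le_of_lt hlen) hf
        have hfnn : 0 ≤ PySem.Chars.findFrom s pvOpen ↑ptr := by omega
        have hcast : PySem.Chars.findFrom s pvOpen ↑ptr
            = ((PySem.Chars.findFrom s pvOpen ↑ptr).toNat : Int) := by omega
        have hF6 := prefix_open_len hOpen
        by_cases he : PySem.Chars.findFrom s pvClose
            ↑(PySem.Chars.findFrom s pvOpen ↑ptr).toNat = -1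
        · -- "<span>" found but no "</span>" after it: both return acc
          have hnoc := (PySem.Chars.findFrom_natCast_eq_neg_one_iff s pvClose
            (PySem.Chars.findFrom s pvOpen ↑ptr).toNat (by omega)).mp he
          have hnocP : ∀ j, (PySem.Chars.findFrom s pvOpen ↑ptr).toNat ≤ j →
              ¬ pvClose <+: s.drop j := by
            intro j hj hpre; exact hnoc (prefix_drop_infix hj hpre)
          have hA : goA s ptr acc = acc := by
            rw [goA, dif_pos hlen, dif_neg (by omega), dif_pos (by rw [hcast, he]; omega)]
          have hB : goB s ptr acc = acc := by
            refine goB_none s acc s.length ptr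
              (PySem.Chars.findFrom s pvOpen ↑ptr).toNat (by omega) hnocP ?_
            intro i hi hpre
            by_contra hcon
            exact hmin i hi (by omega) hpre
          rw [hA, hB]
        · -- both extract text[F:K+7] and continue at K+7
          obtain ⟨hge2, hClose, hmin2⟩ :=
            PySem.Chars.findFrom_natCast_spec s pvClose
              (PySem.Chars.findFrom s pvOpen ↑ptr).toNat (by omega) he
          have henn : 0 ≤ PySem.Chars.findFrom s pvClose
              ↑(PySem.Chars.findFrom s pvOpen ↑ptr).toNat := by omega
          have hcastE : PySem.Chars.findFrom s pvClose
              ↑(PySem.Chars.findFrom s pvOpen ↑ptr).toNat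
              = ((PySem.Chars.findFrom s pvClose
                  ↑(PySem.Chars.findFrom s pvOpen ↑ptr).toNat).toNat : Int) := by omega
          -- abbreviations
          set F := (PySem.Chars.findFrom s pvOpen ↑ptr).toNat with hFdef
          set K := (PySem.Chars.findFrom s pvClose ↑F).toNat with hKdef
          have hFK : F ≤ K := by omega
          have hK6 : F + 6 ≤ K := by
            by_contra hcon
            exact no_close_near hOpen (d := K - F) (by omega)
              (by rw [show F + (K - F) = K by omega]; exact hClose)
          have hK7 : K + 7 ≤ s.length := prefix_close_len hClose
          have hscan : scanClose s (F + 6) = some K :=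
            scanClose_eq_some_of s s.length (F + 6) K (by omega) (by omega) hClose
              (fun i hi hik => hmin2 i (by omega) hik)
          have hA : goA s ptr acc = goA s (K + 7)
              (acc ++ [String.ofList ((s.drop F).take (K + 7 - F))]) := by
            rw [goA, dif_pos hlen, dif_neg (by rw [hcast]; omega),
              dif_neg (by rw [hcast, hcastE]; omega)]
            rw [hcast, hcastE]
            simp only [Int.toNat_natCast]
            rw [show ((K : Int) + 7) = ((K + 7 : Nat) : Int) by push_cast; ring]
            rw [PySem.List.slice_natCast]
          have hB : goB s ptr acc = goB s (K + 7)
              (acc ++ [String.ofList ((s.drop F).take (K + 7 - F))]) := by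
            rw [goB_skip s acc F ptr F (by omega) (by omega)
              (fun i h1 h2 => fun hpre => hmin i h1 h2 hpre)]
            rw [goB, dif_pos (by omega), if_pos (by rw [List.isPrefixOf_iff_prefix]; exact hOpen)]
            split
            · next j heq => rw [hscan] at heq; simp at heq; rw [heq]
            · next heq => rw [hscan] at heq; exact absurd heq (by simp)
          rw [hA, hB]
          exact ih (K + 7) _ (by omega)
    · rw [goA, dif_neg hlen, goB, dif_neg hlen]

-- ===== VERDICT (by name: the statement is the Claim_ definition above) =====
theorem extract_literals_by_tag_py_spec : Claim_equal_extract_literals_by_tag_py := by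
  intro text _
  unfold Spec_extract_literals_by_tag_py extract_literals_by_tag_py extract_literals_by_tag_py_alt
  exact goA_eq_goB text.toList text.toList.length 0 [] (by omega)
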